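-- pv_equiv track=rewrite | github.com/roboflow/inference | inference/core/workflows/execution_engine/executor/core.py | get_masks_intersection_up_to_dimension
-- ===== SOURCE A (Python) =====
-- from typing import Any, Dict, Generator, List, Optional, Set, Tuple, Union
--
-- def get_masks_intersection_up_to_dimension(
--     batch_masks: List[Set[Tuple[int, ...]]],
--     dimension: int,
-- ) -> Set[Tuple[int, ...]]:
--     batch_masks_in_dimension = [
--         {mask_element[:dimension] for mask_element in batch_mask}
--         for batch_mask in batch_masks
--     ]
--     return set.intersection(*batch_masks_in_dimension)
-- ===== SOURCE B (Python) =====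
-- def get_masks_intersection_up_to_dimension(batch_masks, dimension):
--     counts = {}
--     for batch_mask in batch_masks:
--         for prefix in {mask_element[:dimension] for mask_element in batch_mask}:
--             counts[prefix] = counts.get(prefix, 0) + 1
--     return {prefix for prefix, c in counts.items() if c == len(batch_masks)}
-- ===== Notes on version B (the rewrite author's own statement) =====
-- stated objective: alternative
-- what changed: Instead of collecting per-batch prefix sets and folding set.intersection over them, B builds one dict counting in how many batches each truncated prefix occurs and returns the prefixes whose count equals the number of batches.
-- crash fix: On empty batch_masks A raises TypeError (set.intersection called with no arguments) while B returns the empty set. — e.g. on get_masks_intersection_up_to_dimension([], 0): A raises TypeError, B returns []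
import Mathlib
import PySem

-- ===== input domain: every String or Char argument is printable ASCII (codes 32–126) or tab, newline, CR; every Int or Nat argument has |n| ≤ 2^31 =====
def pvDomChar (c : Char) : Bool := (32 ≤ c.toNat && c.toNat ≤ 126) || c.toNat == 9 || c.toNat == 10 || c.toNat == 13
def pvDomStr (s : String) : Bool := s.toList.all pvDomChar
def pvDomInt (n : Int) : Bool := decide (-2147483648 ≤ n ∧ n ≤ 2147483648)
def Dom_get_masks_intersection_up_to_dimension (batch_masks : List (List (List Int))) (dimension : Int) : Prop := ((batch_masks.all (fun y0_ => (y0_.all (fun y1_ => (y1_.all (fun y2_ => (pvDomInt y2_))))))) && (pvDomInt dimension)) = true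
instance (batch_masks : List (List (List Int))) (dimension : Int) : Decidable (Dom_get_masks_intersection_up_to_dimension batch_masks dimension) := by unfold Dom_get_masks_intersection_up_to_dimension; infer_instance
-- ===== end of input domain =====

-- B replaces the collect-then-set.intersection of A by one occurrence-counting dict over all
-- truncated prefixes followed by a single filtering pass (objective: alternative, same cost).

-- ===== PORT A =====
-- A: per-batch sets of truncated prefixes, then set.intersection(*sets).
def get_masks_intersection_up_to_dimension (batch_masks : List (List (List Int))) (dimension : Int) : List (List Int) :=
  let batch_masks_in_dimension : List (List (List Int)) :=
    batch_masks.map (fun batch_mask =>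
      PySem.Set.ofList (batch_mask.map (fun mask_element => PySem.List.slice mask_element none (some dimension))))
  -- set.intersection(s₀, s₁, …) folds intersection over the remaining sets; with NO argument it raises TypeError (excluded by Pre_)
  match batch_masks_in_dimension with
  | [] => []
  | s :: rest => rest.foldl (fun acc t => PySem.Set.inter acc t) s

-- ===== PORT B =====
-- B: count, across batches, how many batches contain each prefix; keep those counted in every batch.
def get_masks_intersection_up_to_dimension_alt (batch_masks : List (List (List Int))) (dimension : Int) : List (List Int) :=
  let counts : PySem.Dict (List Int) Int :=
    batch_masks.foldl (fun counts batch_mask =>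
      (PySem.Set.ofList (batch_mask.map (fun mask_element => PySem.List.slice mask_element none (some dimension)))).foldl
        (fun counts pfx => counts.insert pfx (counts.getD pfx 0 + 1)) counts)
      PySem.Dict.empty
  PySem.Set.ofList ((counts.items.filter (fun pc => pc.2 == (batch_masks.length : Int))).map (fun pc => pc.1))

-- ===== PRECONDITION & SPEC =====
-- Pre_ excludes only the empty batch list, on which A's set.intersection(*[]) raises TypeError.
def Pre_get_masks_intersection_up_to_dimension (batch_masks : List (List (List Int))) (dimension : Int) : Prop :=
  batch_masks ≠ []
instance (batch_masks : List (List (List Int))) (dimension : Int) : Decidable (Pre_get_masks_intersection_up_to_dimension batch_masks dimension) := by unfold Pre_get_masks_intersection_up_to_dimension; infer_instance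

def pvWitness_get_masks_intersection_up_to_dimension : List (List (List Int)) × Int := ([[[0, 1], [2]], [[0, 1]]], 1)

-- On empty batch_masks A raises TypeError (set.intersection with no arguments) while B returns the empty set.
def Raises_get_masks_intersection_up_to_dimension (batch_masks : List (List (List Int))) (dimension : Int) : Prop :=
  batch_masks = []
instance (batch_masks : List (List (List Int))) (dimension : Int) : Decidable (Raises_get_masks_intersection_up_to_dimension batch_masks dimension) := by unfold Raises_get_masks_intersection_up_to_dimension; infer_instance
def pvRaiseWitness_get_masks_intersection_up_to_dimension : List (List (List Int)) × Int := ([], 0)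
def pvRaiseWitnessOut_get_masks_intersection_up_to_dimension : List (List Int) := []

def Spec_get_masks_intersection_up_to_dimension (batch_masks : List (List (List Int))) (dimension : Int) (out : List (List Int)) : Prop := out = get_masks_intersection_up_to_dimension_alt batch_masks dimension
instance (batch_masks : List (List (List Int))) (dimension : Int) (out : List (List Int)) : Decidable (Spec_get_masks_intersection_up_to_dimension batch_masks dimension out) := by unfold Spec_get_masks_intersection_up_to_dimension; infer_instance

-- ===== CLAIM (what is proved, stated in full; the proofs are below) =====
def Claim_equal_get_masks_intersection_up_to_dimension : Prop := ∀ (batch_masks : List (List (List Int))) (dimension : Int), Dom_get_masks_intersection_up_to_dimension batch_masks dimension → Pre_get_masks_intersection_up_to_dimension batch_masks dimension → Spec_get_masks_intersection_up_to_dimension batch_masks dimension (get_masks_intersection_up_to_dimension batch_masks dimension)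

def Claim_raises_get_masks_intersection_up_to_dimension : Prop := (∀ (batch_masks : List (List (List Int))) (dimension : Int), Dom_get_masks_intersection_up_to_dimension batch_masks dimension → Raises_get_masks_intersection_up_to_dimension batch_masks dimension → ¬ Pre_get_masks_intersection_up_to_dimension batch_masks dimension) ∧ (Dom_get_masks_intersection_up_to_dimension (pvRaiseWitness_get_masks_intersection_up_to_dimension.1) (pvRaiseWitness_get_masks_intersection_up_to_dimension.2) ∧ Raises_get_masks_intersection_up_to_dimension (pvRaiseWitness_get_masks_intersection_up_to_dimension.1) (pvRaiseWitness_get_masks_intersection_up_to_dimension.2) ∧ get_masks_intersection_up_to_dimension_alt (pvRaiseWitness_get_masks_intersection_up_to_dimension.1) (pvRaiseWitness_get_masks_intersection_up_to_dimension.2) = pvRaiseWitnessOut_get_masks_intersection_up_to_dimension)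

-- ===== LEMMAS AND PROOFS =====

-- A's fold of set intersections keeps exactly the elements of s present in every later set.
theorem pv_foldl_inter (ts : List (List (List Int))) (s : List (List Int)) :
    ts.foldl (fun acc t => PySem.Set.inter acc t) s
      = s.filter (fun x => ts.all (fun t => PySem.Set.contains t x)) := by
  induction ts generalizing s with
  | nil => simp
  | cons t ts ih =>
    rw [List.foldl_cons, ih]
    show (List.filter (fun x => PySem.Set.contains t x) s).filter _ = _
    simp only [List.filter_filter, List.all_cons]
    apply List.filter_congr
    intro x _
    simp [Bool.and_comm]

-- the count of an element in a Nodup list is at most one, so the sum is at most the number of lists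
theorem pv_sum_counts_le (k : List Int) (L : List (List (List Int)))
    (hnd : ∀ t ∈ L, t.Nodup) :
    (L.map (List.count k)).sum ≤ L.length := by
  induction L with
  | nil => simp
  | cons u L ihL =>
    have hu : List.count k u = if k ∈ u then 1 else 0 := List.Nodup.count (hnd u (by simp))
    have := ihL (fun t ht => hnd t (by simp [ht]))
    simp only [List.map_cons, List.sum_cons, List.length_cons]
    split at hu <;> omega

-- a sum of per-list counts reaches the number of lists iff every (Nodup) list contains the element
theorem pv_sum_counts_eq_length (k : List Int) (L : List (List (List Int)))
    (hnd : ∀ t ∈ L, t.Nodup) :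
    ((L.map (List.count k)).sum = L.length) ↔ (∀ t ∈ L, k ∈ t) := by
  induction L with
  | nil => simp
  | cons t L ih =>
    have hc : List.count k t = if k ∈ t then 1 else 0 := List.Nodup.count (hnd t (by simp))
    have hle : (L.map (List.count k)).sum ≤ L.length :=
      pv_sum_counts_le k L (fun t ht => hnd t (by simp [ht]))
    rw [List.map_cons, List.sum_cons, List.length_cons]
    have hihs := ih (fun u hu => hnd u (by simp [hu]))
    constructor
    · intro h
      by_cases hk : k ∈ t
      · rw [if_pos hk] at hc
        intro u humem
        rcases List.mem_cons.mp humem with rfl | hu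
        · exact hk
        · exact (hihs.mp (by omega)) u hu
      · rw [if_neg hk] at hc
        omega
    · intro h
      have hkt : k ∈ t := h t (by simp)
      have : ∀ u ∈ L, k ∈ u := fun u hu => h u (by simp [hu])
      rw [hc, if_pos hkt, hihs.mpr this]
      omega

-- folding Set.add over extra elements does not change a filter whose predicate implies membership in s
theorem pv_filter_foldl_add (q : List Int → Bool) (r : List (List Int)) (s : List (List Int))
    (h : ∀ x, q x = true → x ∈ s) :
    (r.foldl PySem.Set.add s).filter q = s.filter q := by
  induction r generalizing s with
  | nil => rfl
  | cons y r ih =>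
    rw [List.foldl_cons]
    by_cases hy : y ∈ s
    · rw [PySem.Set.add_of_mem hy]
      exact ih s h
    · rw [PySem.Set.add_of_not_mem hy]
      have h' : ∀ x, q x = true → x ∈ s ++ [y] := fun x hx => by
        simp [h x hx]
      rw [ih (s ++ [y]) h', List.filter_append]
      have : q y = false := by
        by_contra hq
        exact hy (h y (by simpa using hq))
      simp [this]

theorem get_masks_intersection_spec_aux (b0 : List (List Int)) (bs : List (List (List Int))) (dimension : Int) :
    get_masks_intersection_up_to_dimension (b0 :: bs) dimension
      = get_masks_intersection_up_to_dimension_alt (b0 :: bs) dimension := by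
  -- notation
  set f : List (List Int) → List (List Int) :=
    fun batch_mask => PySem.Set.ofList (batch_mask.map (fun mask_element => PySem.List.slice mask_element none (some dimension))) with hf
  have hnodup : ∀ b, (f b).Nodup := fun b => PySem.Set.nodup_ofList _
  -- A's side
  have hA : get_masks_intersection_up_to_dimension (b0 :: bs) dimension
      = (f b0).filter (fun x => (bs.map f).all (fun t => PySem.Set.contains t x)) := by
    simp only [get_masks_intersection_up_to_dimension, List.map_cons]
    rw [pv_foldl_inter]
  -- B's counts dict is the counter of the flattened prefix sets
  have hcounts : (b0 :: bs).foldl (fun counts batch_mask =>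
        (f batch_mask).foldl (fun counts pfx => counts.insert pfx (counts.getD pfx 0 + 1)) counts)
        PySem.Dict.empty
      = PySem.Dict.counter (((b0 :: bs).map f).flatten) := by
    rw [← PySem.Dict.foldl_insert_getD_add_one_eq_counter, List.foldl_flatten, List.foldl_map]
  -- the flattened list of prefixes
  set F : List (List Int) := ((b0 :: bs).map f).flatten with hF
  set n : Nat := (b0 :: bs).length with hn
  set q : List Int → Bool := fun k => ((F.count k : Int) == (n : Int)) with hq
  -- the count reaches n exactly on the common prefixes
  have hqiff : ∀ k, q k = true ↔ (∀ t ∈ (b0 :: bs).map f, k ∈ t) := by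
    intro k
    have : q k = true ↔ F.count k = n := by
      simp only [hq, beq_iff_eq]
      omega
    rw [this, hF, List.count_flatten]
    have hlen : n = ((b0 :: bs).map f).length := by simp [hn]
    rw [hlen]
    exact pv_sum_counts_eq_length k _ (by intro t ht; rcases List.mem_map.mp ht with ⟨b, _, rfl⟩; exact hnodup b)
  -- B's side
  have hB : get_masks_intersection_up_to_dimension_alt (b0 :: bs) dimension
      = (f b0).filter q := by
    simp only [get_masks_intersection_up_to_dimension_alt]
    rw [hcounts, PySem.Dict.items_counter, List.filter_map, List.map_map]
    show PySem.Set.ofList (List.map id ((PySem.Set.ofList F).filter q)) = _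
    rw [List.map_id]
    -- ofList F = fold add over the tail, starting from f b0
    have hofF : PySem.Set.ofList F = ((bs.map f).flatten).foldl PySem.Set.add (f b0) := by
      rw [PySem.Set.ofList_eq_foldl, hF, List.map_cons, List.flatten_cons, List.foldl_append,
        ← PySem.Set.ofList_eq_foldl, PySem.Set.ofList_eq_self_of_nodup _ (hnodup b0)]
    have hqmem : ∀ x, q x = true → x ∈ f b0 := by
      intro x hx
      exact (hqiff x).mp hx (f b0) (by simp)
    rw [hofF, pv_filter_foldl_add q _ _ hqmem]
    exact PySem.Set.ofList_eq_self_of_nodup _ (List.Nodup.filter _ (hnodup b0))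
  rw [hA, hB]
  apply List.filter_congr
  intro x hx
  rw [Bool.eq_iff_iff, hqiff x, List.map_cons]
  simp only [List.all_eq_true, List.mem_cons]
  constructor
  · rintro h t (rfl | htl)
    · exact hx
    · exact (PySem.Set.contains_iff _ _).mp (h t htl)
  · intro h t htl
    exact (PySem.Set.contains_iff _ _).mpr (h t (Or.inr htl))

-- ===== VERDICT (by name: the statement is the Claim_ definition above) =====
theorem get_masks_intersection_up_to_dimension_spec : Claim_equal_get_masks_intersection_up_to_dimension := by
  intro batch_masks dimension _ hpre
  unfold Spec_get_masks_intersection_up_to_dimension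
  match batch_masks, hpre with
  | b0 :: bs, _ => exact get_masks_intersection_spec_aux b0 bs dimension

theorem get_masks_intersection_up_to_dimension_raises : Claim_raises_get_masks_intersection_up_to_dimension := by
  unfold Claim_raises_get_masks_intersection_up_to_dimension
  exact ⟨fun bm d _ hr hp => hp hr, by decide⟩

-- self-check: B's port indeed returns the empty set on the excluded empty input (read off the raises claim)
theorem pv_raise_witness_value_ok : get_masks_intersection_up_to_dimension_alt [] 0 = [] :=
  get_masks_intersection_up_to_dimension_raises.2.2.2
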